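-- pv_equiv track=rewrite | github.com/andyafter/blackjack | analysis.py | calculate_true_count
-- ===== SOURCE A (Python) =====
-- def calculate_true_count(board):
--     TC=0
--     for card in board:
--         if card in ["2","3","4","5","6"]:
--             TC +=1
--         elif card in ["T","J","Q","K","A"]:
--             TC -=1
--     return TC
-- ===== SOURCE B (Python) =====
-- LOW = ("2", "3", "4", "5", "6")
-- HIGH = ("T", "J", "Q", "K", "A")
--
-- def calculate_true_count(board):
--     # Count per rank: total low-card occurrences minus total high-card occurrences.
--     return sum(board.count(r) for r in LOW) - sum(board.count(r) for r in HIGH)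
-- ===== Notes on version B (the rewrite author's own statement) =====
-- stated objective: alternative
-- what changed: Replaces A's single pass over the board with a per-card two-branch accumulator by a per-rank aggregation: B iterates over the ten ranks and sums board.count(r) for the low ranks minus the high ranks, so the board is scanned per rank and no per-card branching or running accumulator exists.
import Mathlib
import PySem

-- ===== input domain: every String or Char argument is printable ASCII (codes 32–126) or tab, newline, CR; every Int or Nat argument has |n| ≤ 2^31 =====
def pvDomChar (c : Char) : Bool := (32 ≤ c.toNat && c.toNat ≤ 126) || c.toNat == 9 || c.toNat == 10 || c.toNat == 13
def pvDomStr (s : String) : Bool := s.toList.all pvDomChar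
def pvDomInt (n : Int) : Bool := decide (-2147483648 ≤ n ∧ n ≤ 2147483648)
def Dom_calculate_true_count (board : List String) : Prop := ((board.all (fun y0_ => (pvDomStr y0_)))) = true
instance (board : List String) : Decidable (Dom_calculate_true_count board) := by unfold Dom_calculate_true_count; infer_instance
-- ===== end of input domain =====

-- B replaces A's per-card branching pass by a per-rank aggregation (count low ranks minus count high ranks); alternative decomposition, same result.

-- ===== PORT A =====
def calculate_true_count (board : List String) : Int :=
  board.foldl (fun TC card =>
    if card ∈ ["2", "3", "4", "5", "6"] then TC + 1
    else if card ∈ ["T", "J", "Q", "K", "A"] then TC - 1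
    else TC) 0

-- ===== PORT B =====
def pvLow : List String := ["2", "3", "4", "5", "6"]
def pvHigh : List String := ["T", "J", "Q", "K", "A"]

def calculate_true_count_alt (board : List String) : Int :=
  ((pvLow.map (fun r => (board.count r : Int))).sum)
    - ((pvHigh.map (fun r => (board.count r : Int))).sum)

-- ===== PRECONDITION & SPEC =====
def Spec_calculate_true_count (board : List String) (out : Int) : Prop := out = calculate_true_count_alt board
instance (board : List String) (out : Int) : Decidable (Spec_calculate_true_count board out) := by unfold Spec_calculate_true_count; infer_instance

-- ===== CLAIM (what is proved, stated in full; the proofs are below) =====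
def Claim_equal_calculate_true_count : Prop := ∀ (board : List String), Dom_calculate_true_count board → Spec_calculate_true_count board (calculate_true_count board)

-- ===== LEMMAS AND PROOFS =====

-- B's step: prepending one card changes the rank-count difference by that card's delta
theorem pv_alt_cons (c : String) (cs : List String) :
    calculate_true_count_alt (c :: cs) =
      (if c ∈ ["2", "3", "4", "5", "6"] then (1 : Int)
       else if c ∈ ["T", "J", "Q", "K", "A"] then -1 else 0)
        + calculate_true_count_alt cs := by
  by_cases h2 : c = "2"
  · subst h2; simp [calculate_true_count_alt, pvLow, pvHigh, List.count_cons]; ring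
  by_cases h3 : c = "3"
  · subst h3; simp [calculate_true_count_alt, pvLow, pvHigh, List.count_cons]; ring
  by_cases h4 : c = "4"
  · subst h4; simp [calculate_true_count_alt, pvLow, pvHigh, List.count_cons]; ring
  by_cases h5 : c = "5"
  · subst h5; simp [calculate_true_count_alt, pvLow, pvHigh, List.count_cons]; ring
  by_cases h6 : c = "6"
  · subst h6; simp [calculate_true_count_alt, pvLow, pvHigh, List.count_cons]; ring
  by_cases hT : c = "T"
  · subst hT; simp [calculate_true_count_alt, pvLow, pvHigh, List.count_cons]; ring
  by_cases hJ : c = "J"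
  · subst hJ; simp [calculate_true_count_alt, pvLow, pvHigh, List.count_cons]; ring
  by_cases hQ : c = "Q"
  · subst hQ; simp [calculate_true_count_alt, pvLow, pvHigh, List.count_cons]; ring
  by_cases hK : c = "K"
  · subst hK; simp [calculate_true_count_alt, pvLow, pvHigh, List.count_cons]; ring
  by_cases hA : c = "A"
  · subst hA; simp [calculate_true_count_alt, pvLow, pvHigh, List.count_cons]; ring
  · simp [calculate_true_count_alt, pvLow, pvHigh, List.count_cons,
      h2, h3, h4, h5, h6, hT, hJ, hQ, hK, hA]

theorem pv_eq (board : List String) :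
    calculate_true_count board = calculate_true_count_alt board := by
  unfold calculate_true_count
  have h : ∀ (a : Int),
      board.foldl (fun TC card =>
        if card ∈ ["2", "3", "4", "5", "6"] then TC + 1
        else if card ∈ ["T", "J", "Q", "K", "A"] then TC - 1
        else TC) a = a + calculate_true_count_alt board := by
    induction board with
    | nil => intro a; simp [calculate_true_count_alt, pvLow, pvHigh]
    | cons c cs ih =>
      intro a
      simp only [List.foldl_cons, ih, pv_alt_cons]
      split_ifs <;> ring
  simpa using h 0

-- ===== VERDICT (by name: the statement is the Claim_ definition above) =====
theorem calculate_true_count_spec : Claim_equal_calculate_true_count := by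
  intro board _
  exact pv_eq board
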